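-- pv_equiv track=rewrite | github.com/KostasPelelis/onevone | onevone/utils.py | timelines_average
-- ===== SOURCE A (Python) =====
-- def timelines_average(data=[]):
--     ret = []
--     bag = list(filter(lambda x: len(x) > 0, data))
--     idx = 0
--     data_keys = ({k: None for entry in data for k in entry}).keys()
--     while len(bag) > 0:
--         freq_table = {k: 0 for k in data_keys}
--         for entry in bag:
--             val = entry[idx]
--             freq_table[val] += 1
--         max_s = max(freq_table, key=freq_table.get)
--         ret.append(max_s)
--         bag = list(filter(lambda x: x[idx] == max_s, bag))
--         bag = list(filter(lambda x: len(x) > idx + 1, bag))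
--         idx += 1
--     return ret
-- ===== SOURCE B (Python) =====
-- def timelines_average(data=[]):
--     # Alternative algorithm: build a prefix-count trie of all sequences in one
--     # preprocessing pass, then walk it greedily; no per-round rescanning or
--     # filtering of the sequence bag.
--     order = {}
--     for e in data:
--         for k in e:
--             if k not in order:
--                 order[k] = len(order)
--     cnt = {}
--     children = {}
--     for e in data:
--         for i in range(len(e)):
--             q = tuple(e[:i + 1])
--             if q in cnt:
--                 cnt[q] += 1
--             else:
--                 cnt[q] = 1
--                 children.setdefault(tuple(e[:i]), []).append(e[i])
--     ret = []
--     prefix = ()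
--     while prefix in children:
--         best = min(children[prefix], key=lambda v: (-cnt[prefix + (v,)], order[v]))
--         ret.append(best)
--         prefix = prefix + (best,)
--     return ret
-- ===== Notes on version B (the rewrite author's own statement) =====
-- stated objective: faster
-- what changed: B replaces A's round-by-round recount-and-filter with a different algorithm: one preprocessing pass builds a prefix-count trie (counts and child lists keyed by sequence prefixes) plus a first-occurrence key order, then the answer is a greedy walk of the trie that never rescans or filters the sequences and never rebuilds a zeroed frequency table over all distinct keys.
import Mathlib
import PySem

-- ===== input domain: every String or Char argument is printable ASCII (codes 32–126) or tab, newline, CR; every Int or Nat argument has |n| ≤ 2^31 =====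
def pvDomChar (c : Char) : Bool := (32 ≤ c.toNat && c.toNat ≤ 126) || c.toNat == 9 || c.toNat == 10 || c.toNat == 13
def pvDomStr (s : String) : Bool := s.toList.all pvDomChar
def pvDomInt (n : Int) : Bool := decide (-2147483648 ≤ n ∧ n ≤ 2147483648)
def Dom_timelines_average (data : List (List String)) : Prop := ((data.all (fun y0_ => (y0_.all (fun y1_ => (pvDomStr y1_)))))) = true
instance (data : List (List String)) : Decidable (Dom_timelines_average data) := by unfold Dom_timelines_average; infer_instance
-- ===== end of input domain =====

-- B is an alternative algorithm: it builds a prefix-count trie of the sequences once,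
-- then walks it greedily, instead of A's round-by-round re-counting and bag filtering.

-- ===== PORT A =====
-- while-loop of A, totalised with fuel (the loop runs at most max-entry-length times;
-- fuel only makes the same computation total, it never changes a value the Python reaches)
def pvLoopA (dataKeys : List String) : Nat → List (List String) → Nat → List String → List String
  | 0, _, _, ret => ret
  | fuel + 1, bag, idx, ret =>
    if 0 < bag.length then
      -- freq_table = {k: 0 for k in data_keys}; for entry in bag: freq_table[entry[idx]] += 1
      -- (entry[idx] is always in range and its value always a key of freq_table on reachable
      -- states, so getD/modify are exact here)
      let freq := bag.foldl (fun d entry => d.modify (entry.getD idx "") 0 (· + 1))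
        (dataKeys.foldl (fun d k => d.insert k (0 : Int)) PySem.Dict.empty)
      -- max_s = max(freq_table, key=freq_table.get)  (every key present, so .get = getD)
      match PySem.List.max? freq.keys (fun k => freq.getD k 0) with
      | none => ret   -- unreachable: bag ≠ [] forces data_keys ≠ []
      | some maxS =>
        pvLoopA dataKeys fuel
          (((bag.filter (fun x => x.getD idx "" == maxS)).filter
            (fun x => decide (idx + 1 < x.length))))
          (idx + 1) (ret ++ [maxS])
    else ret

def timelines_average (data : List (List String)) : List String :=
  let bag := data.filter (fun x => decide (0 < x.length))
  -- data_keys = ({k: None for entry in data for k in entry}).keys()  (ordered dedup)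
  let dataKeys := PySem.List.dedup (data.flatMap (fun e => e))
  pvLoopA dataKeys ((data.map List.length).foldl max 0 + 1) bag 0 []

-- ===== PORT B =====
-- for e in data: for i in range(len(e)): q = e[:i+1]; if q in cnt: cnt[q] += 1
--   else: cnt[q] = 1; children.setdefault(e[:i], []).append(e[i])
-- (range(len(e)) yields 0..len(e)-1, so 'i' is a Nat index here — exact; e[:i+1] with
--  0 ≤ i is e.take (i+1); e[i] is in range, so getD is exact;
--  setdefault(p, []).append(v) == insert p (getD p [] ++ [v]): appends the key if fresh,
--  keeps its position and extends the list otherwise — exactly Python's dict semantics)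
def pvBuild (data : List (List String)) :
    PySem.Dict (List String) Int × PySem.Dict (List String) (List String) :=
  data.foldl (fun st e =>
    (List.range e.length).foldl (fun st i =>
      if st.1.contains (e.take (i + 1)) then
        (st.1.modify (e.take (i + 1)) 0 (· + 1), st.2)
      else
        (st.1.insert (e.take (i + 1)) 1,
         st.2.insert (e.take i) (st.2.getD (e.take i) [] ++ [e.getD i ""])))
      st)
    (PySem.Dict.empty, PySem.Dict.empty)

-- while prefix in children: best = min(children[prefix], key=...); ret.append(best);
-- prefix = prefix + (best,)   — totalised with fuel (prefix grows each round and trie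
-- depth is bounded by the longest sequence; fuel never changes a value Python reaches)
def pvLoopB (cnt : PySem.Dict (List String) Int) (ch : PySem.Dict (List String) (List String))
    (ord : PySem.Dict String Int) : Nat → List String → List String → List String
  | 0, _, ret => ret
  | fuel + 1, pfx, ret =>
    if ch.contains pfx then
      -- min(children[prefix], key=lambda v: (-cnt[prefix+(v,)], order[v]))
      -- (children[prefix] is nonempty and its members' keys are all present)
      match PySem.List.min2? (ch.getD pfx [])
          (fun v => -(cnt.getD (pfx ++ [v]) 0)) (fun v => ord.getD v 0) with
      | none => ret   -- unreachable: children lists are nonempty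
      | some best => pvLoopB cnt ch ord fuel (pfx ++ [best]) (ret ++ [best])
    else ret

def timelines_average_alt (data : List (List String)) : List String :=
  -- order = {}; for e in data: for k in e: if k not in order: order[k] = len(order)
  let ord := data.foldl
    (fun d entry => entry.foldl
      (fun d k => if d.contains k then d else d.insert k (d.size : Int)) d)
    PySem.Dict.empty
  let st := pvBuild data
  pvLoopB st.1 st.2 ord ((data.map List.length).foldl max 0 + 1) [] []

-- ===== PRECONDITION & SPEC =====
def Spec_timelines_average (data : List (List String)) (out : List String) : Prop := out = timelines_average_alt data
instance (data : List (List String)) (out : List String) : Decidable (Spec_timelines_average data out) := by unfold Spec_timelines_average; infer_instance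

-- ===== CLAIM (what is proved, stated in full; the proofs are below) =====
def Claim_equal_timelines_average : Prop := ∀ (data : List (List String)), Dom_timelines_average data → Spec_timelines_average data (timelines_average data)

-- ===== LEMMAS AND PROOFS =====

-- proof-only abbreviations: the event stream of B's build loop, its step, and the
-- "surviving bag values" at a prefix
def pvStep (st : PySem.Dict (List String) Int × PySem.Dict (List String) (List String))
    (pv : List String × String) :
    PySem.Dict (List String) Int × PySem.Dict (List String) (List String) :=
  if st.1.contains (pv.1 ++ [pv.2]) then
    (st.1.modify (pv.1 ++ [pv.2]) 0 (· + 1), st.2)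
  else
    (st.1.insert (pv.1 ++ [pv.2]) 1, st.2.insert pv.1 (st.2.getD pv.1 [] ++ [pv.2]))

def pvEvents (data : List (List String)) : List (List String × String) :=
  data.flatMap (fun e => (List.range e.length).map (fun i => (e.take i, e.getD i "")))

def pvBagVals (data : List (List String)) (p : List String) : List String :=
  (data.filter (fun e => e.take p.length == p && decide (p.length < e.length))).map
    (fun e => e.getD p.length "")

-- zeros dict: every lookup with default 0 gives 0
theorem pv_getD_zeros (ks : List String) (d : PySem.Dict String Int)
    (hd : ∀ v, d.getD v 0 = 0) (v : String) :
    (ks.foldl (fun d k => d.insert k (0 : Int)) d).getD v 0 = 0 := by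
  induction ks generalizing d with
  | nil => exact hd v
  | cons k t ih =>
    refine ih _ (fun w => ?_)
    rw [PySem.Dict.getD_insert]
    split <;> simp [hd]

-- Set.add of a member is a no-op
theorem pv_set_add_mem (s : List String) (x : String) (h : x ∈ s) :
    PySem.Set.add s x = s := by
  simp [PySem.Set.add, PySem.Set.contains, h]

-- Set.update with already-present elements is a no-op
theorem pv_set_update_sub (l s : List String) (h : ∀ x ∈ l, x ∈ s) :
    PySem.Set.update s l = s := by
  induction l generalizing s with
  | nil => rfl
  | cons x t ih =>
    have : PySem.Set.update s (x :: t) = PySem.Set.update (PySem.Set.add s x) t := rfl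
    rw [this, pv_set_add_mem s x (h x (by simp))]
    exact ih s (fun y hy => h y (by simp [hy]))

-- Set.update of a nodup suffix appends it
theorem pv_set_update_nodup (t s : List String) (h : (s ++ t).Nodup) :
    PySem.Set.update s t = s ++ t := by
  induction t generalizing s with
  | nil => simp [PySem.Set.update]
  | cons x t ih =>
    have hx : x ∉ s := by
      intro hm
      exact (List.disjoint_of_nodup_append h hm) (by simp)
    have : PySem.Set.update s (x :: t) = PySem.Set.update (PySem.Set.add s x) t := rfl
    rw [this]
    have hadd : PySem.Set.add s x = s ++ [x] := by
      simp [PySem.Set.add, PySem.Set.contains, hx]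
    rw [hadd, ih (s ++ [x]) (by simpa using h), List.append_assoc]
    rfl

theorem pv_set_ofList_self (s : List String) (h : s.Nodup) :
    PySem.Set.ofList s = s := by
  have := pv_set_update_nodup s [] (by simpa using h)
  simpa [PySem.Set.ofList_eq_foldl, PySem.Set.update] using this

-- Set.ofList through an appended element
theorem pv_set_ofList_append (l : List String) (v : String) :
    PySem.Set.ofList (l ++ [v]) =
      if v ∈ l then PySem.Set.ofList l else PySem.Set.ofList l ++ [v] := by
  have h0 : PySem.Set.ofList (l ++ [v]) = PySem.Set.add (PySem.Set.ofList l) v := by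
    rw [PySem.Set.ofList_eq_foldl, List.foldl_append, ← PySem.Set.ofList_eq_foldl]
    rfl
  rw [h0]
  by_cases h : v ∈ l
  · rw [if_pos h]
    exact pv_set_add_mem _ v ((PySem.Set.mem_ofList _ _).mpr h)
  · rw [if_neg h]
    have hnc : v ∉ PySem.Set.ofList l := fun hc => h ((PySem.Set.mem_ofList _ _).mp hc)
    simp [PySem.Set.add, PySem.Set.contains, hnc]

-- ---- characterisation of max? (first maximal element) ----
def pvMaxStep (key : String → Int) (acc : Option String) (x : String) : Option String :=
  match acc with
  | none => some x
  | some m => if key m < key x then some x else some m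

theorem pv_max?_eq_fold (key : String → Int) (xs : List String) :
    PySem.List.max? xs key = xs.foldl (pvMaxStep key) none := by
  simp only [PySem.List.max?]
  congr 1
  funext acc x
  cases acc <;> rfl

theorem pv_max_fold_decomp (key : String → Int) (t : List String) (a m : String)
    (h : t.foldl (pvMaxStep key) (some a) = some m) :
    (m = a ∧ ∀ y ∈ t, key y ≤ key a) ∨
    (∃ l1 l2, t = l1 ++ m :: l2 ∧ key a < key m ∧ (∀ y ∈ l1, key y < key m) ∧
      (∀ y ∈ l2, key y ≤ key m)) := by
  induction t generalizing a with
  | nil =>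
    left
    refine ⟨by simpa using h.symm, by simp⟩
  | cons x t ih =>
    simp only [List.foldl_cons, pvMaxStep] at h
    by_cases hx : key a < key x
    · rw [if_pos hx] at h
      rcases ih x h with ⟨he, hb⟩ | ⟨l1, l2, he, hk, h1, h2⟩
      · subst he
        right
        exact ⟨[], t, rfl, hx, by simp, hb⟩
      · right
        refine ⟨x :: l1, l2, by simp [he], lt_trans hx hk, ?_, h2⟩
        intro y hy
        rcases List.mem_cons.mp hy with rfl | hy
        · exact hk
        · exact h1 y hy
    · rw [if_neg hx] at h
      rcases ih a h with ⟨he, hb⟩ | ⟨l1, l2, he, hk, h1, h2⟩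
      · left
        refine ⟨he, fun y hy => ?_⟩
        rcases List.mem_cons.mp hy with rfl | hy
        · subst he; exact le_of_not_gt hx
        · exact hb y hy
      · right
        refine ⟨x :: l1, l2, by simp [he], hk, ?_, h2⟩
        intro y hy
        rcases List.mem_cons.mp hy with rfl | hy
        · exact lt_of_le_of_lt (le_of_not_gt hx) hk
        · exact h1 y hy

theorem pv_max?_decomp (key : String → Int) (xs : List String) (m : String)
    (h : PySem.List.max? xs key = some m) :
    ∃ l1 l2, xs = l1 ++ m :: l2 ∧ (∀ y ∈ l1, key y < key m) ∧ (∀ y ∈ l2, key y ≤ key m) := by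
  cases xs with
  | nil => simp [PySem.List.max?] at h
  | cons x t =>
    rw [pv_max?_eq_fold, List.foldl_cons] at h
    rcases pv_max_fold_decomp key t x m h with ⟨he, hb⟩ | ⟨l1, l2, he, hk, h1, h2⟩
    · subst he
      exact ⟨[], t, rfl, by simp, hb⟩
    · refine ⟨x :: l1, l2, by simp [he], ?_, h2⟩
      intro y hy
      rcases List.mem_cons.mp hy with rfl | hy
      · exact hk
      · exact h1 y hy

-- ---- characterisation of min2? (a lex-minimal element) ----
def pvMin2Step (k1 k2 : String → Int) (acc : Option String) (x : String) : Option String :=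
  match acc with
  | none => some x
  | some m =>
    if (decide (k1 x < k1 m) || !decide (k1 m < k1 x) && decide (k2 x < k2 m)) = true
    then some x else some m

theorem pv_min2?_eq_fold (k1 k2 : String → Int) (xs : List String) :
    PySem.List.min2? xs k1 k2 = xs.foldl (pvMin2Step k1 k2) none := by
  simp only [PySem.List.min2?]
  congr 1
  funext acc x
  cases acc <;> rfl

theorem pv_min2_fold_min (k1 k2 : String → Int) (t : List String) (a m : String)
    (h : t.foldl (pvMin2Step k1 k2) (some a) = some m) :
    (m = a ∨ m ∈ t) ∧
    (¬ (k1 a < k1 m ∨ (k1 a = k1 m ∧ k2 a < k2 m))) ∧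
    (∀ y ∈ t, ¬ (k1 y < k1 m ∨ (k1 y = k1 m ∧ k2 y < k2 m))) := by
  induction t generalizing a with
  | nil =>
    refine ⟨Or.inl (by simpa using h.symm), ?_, by simp⟩
    have he : m = a := by simpa using h.symm
    subst he
    omega
  | cons x t ih =>
    simp only [List.foldl_cons, pvMin2Step] at h
    by_cases hx : (decide (k1 x < k1 a) || !decide (k1 a < k1 x) && decide (k2 x < k2 a)) = true
    · rw [if_pos hx] at h
      simp only [Bool.or_eq_true, Bool.and_eq_true, Bool.not_eq_eq_eq_not, Bool.not_true,
        decide_eq_true_eq, decide_eq_false_iff_not] at hx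
      rcases ih x h with ⟨hmem, hax, hall⟩
      refine ⟨?_, ?_, ?_⟩
      · rcases hmem with rfl | hm
        · exact Or.inr (by simp)
        · exact Or.inr (by simp [hm])
      · omega
      · intro y hy
        rcases List.mem_cons.mp hy with rfl | hy
        · exact hax
        · exact hall y hy
    · rw [if_neg hx] at h
      simp only [Bool.or_eq_true, Bool.and_eq_true, Bool.not_eq_eq_eq_not, Bool.not_true,
        decide_eq_true_eq, decide_eq_false_iff_not] at hx
      push Not at hx
      rcases ih a h with ⟨hmem, hax, hall⟩
      refine ⟨?_, hax, ?_⟩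
      · rcases hmem with rfl | hm
        · exact Or.inl rfl
        · exact Or.inr (by simp [hm])
      · intro y hy
        rcases List.mem_cons.mp hy with rfl | hy
        · omega
        · exact hall y hy

theorem pv_min2_fold_isSome (k1 k2 : String → Int) (t : List String) :
    ∀ a : String, ∃ m, t.foldl (pvMin2Step k1 k2) (some a) = some m := by
  induction t with
  | nil => intro a; exact ⟨a, rfl⟩
  | cons x t ih =>
    intro a
    simp only [List.foldl_cons, pvMin2Step]
    split
    · exact ih x
    · exact ih a

theorem pv_min2?_isSome (k1 k2 : String → Int) (xs : List String) (h : xs ≠ []) :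
    ∃ m, PySem.List.min2? xs k1 k2 = some m := by
  cases xs with
  | nil => exact absurd rfl h
  | cons x t =>
    rw [pv_min2?_eq_fold, List.foldl_cons]
    exact pv_min2_fold_isSome k1 k2 t x

theorem pv_min2?_min (k1 k2 : String → Int) (xs : List String) (m : String)
    (h : PySem.List.min2? xs k1 k2 = some m) :
    m ∈ xs ∧ ∀ y ∈ xs, ¬ (k1 y < k1 m ∨ (k1 y = k1 m ∧ k2 y < k2 m)) := by
  cases xs with
  | nil => simp [PySem.List.min2?] at h
  | cons x t =>
    rw [pv_min2?_eq_fold, List.foldl_cons] at h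
    rcases pv_min2_fold_min k1 k2 t x m h with ⟨hmem, hax, hall⟩
    refine ⟨?_, ?_⟩
    · rcases hmem with rfl | hm
      · simp
      · simp [hm]
    · intro y hy
      rcases List.mem_cons.mp hy with rfl | hy
      · exact hax
      · exact hall y hy

-- idxOf through an append whose first part misses the element
theorem pv_idxOf_append (l1 l2 : List String) (x : String) (h : x ∉ l1) :
    (l1 ++ l2).idxOf x = l1.length + l2.idxOf x := by
  induction l1 with
  | nil => simp
  | cons a t ih =>
    simp only [List.mem_cons, not_or] at h
    rw [List.cons_append, List.idxOf_cons_ne _ (fun e => h.1 e.symm), ih h.2, List.length_cons]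
    omega

-- ---- the selection step: A's argmax over all keys = B's lex-argmin over bag values ----
theorem pv_pick_eq (ks vals : List String) (ord : String → Int)
    (hne : vals ≠ []) (hsub : ∀ v ∈ vals, v ∈ ks)
    (hord : ∀ v ∈ ks, ord v = (ks.idxOf v : Int)) :
    PySem.List.max? ks (fun k => (vals.count k : Int)) =
      PySem.List.min2? (PySem.Set.ofList vals) (fun v => -(vals.count v : Int)) ord := by
  obtain ⟨v0, hv0⟩ := List.exists_mem_of_ne_nil vals hne
  have hksne : ks ≠ [] := List.ne_nil_of_mem (hsub v0 hv0)
  obtain ⟨m, hm⟩ : ∃ m, PySem.List.max? ks (fun k => (vals.count k : Int)) = some m := by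
    cases h : PySem.List.max? ks (fun k => (vals.count k : Int)) with
    | none => exact absurd ((PySem.List.max?_eq_none_iff _ _).mp h) hksne
    | some m => exact ⟨m, rfl⟩
  obtain ⟨l1, l2, hks, h1, h2⟩ := pv_max?_decomp _ ks m hm
  have hmax : ∀ y ∈ ks, vals.count y ≤ vals.count m := by
    intro y hy
    rw [hks] at hy
    rcases List.mem_append.mp hy with hy | hy
    · exact_mod_cast le_of_lt (h1 y hy)
    · rcases List.mem_cons.mp hy with rfl | hy
      · exact le_refl _
      · exact_mod_cast h2 y hy
  have hmvals : m ∈ vals := by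
    have h1' : 0 < vals.count v0 := List.count_pos_iff.mpr hv0
    have := hmax v0 (hsub v0 hv0)
    exact List.count_pos_iff.mp (by omega)
  have hmS : m ∈ PySem.Set.ofList vals := (PySem.Set.mem_ofList _ _).mpr hmvals
  obtain ⟨m', hm'⟩ := pv_min2?_isSome (fun v => -(vals.count v : Int)) ord
    (PySem.Set.ofList vals) (List.ne_nil_of_mem hmS)
  rcases pv_min2?_min _ _ _ _ hm' with ⟨hm'S, hminall⟩
  have hm'vals : m' ∈ vals := (PySem.Set.mem_ofList _ _).mp hm'S
  have hm'ks : m' ∈ ks := hsub m' hm'vals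
  have hmin := hminall m hmS
  have hcle : vals.count m' ≤ vals.count m := hmax m' hm'ks
  have hceq : vals.count m' = vals.count m := by
    by_contra hne'
    exact hmin (Or.inl (by omega))
  have hidx : ks.idxOf m' ≤ ks.idxOf m := by
    have := hmin
    rw [hord m (hsub m hmvals), hord m' hm'ks] at this
    have h2' : ¬ ((ks.idxOf m : Int) < (ks.idxOf m' : Int)) := by
      intro hlt
      exact this (Or.inr ⟨by omega, hlt⟩)
    exact_mod_cast not_lt.mp h2'
  have hmnl1 : m ∉ l1 := fun hc => absurd (h1 m hc) (lt_irrefl _)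
  have hm'nl1 : m' ∉ l1 := by
    intro hc
    have := h1 m' hc
    omega
  rcases (by rw [hks] at hm'ks; exact hm'ks : m' ∈ l1 ++ m :: l2) with hmem
  rcases List.mem_append.mp hmem with hc | hc
  · exact absurd hc hm'nl1
  · rcases List.mem_cons.mp hc with rfl | hc
    · rw [hm, hm']
    · by_cases heq : m' = m
      · rw [hm, hm', heq]
      · exfalso
        have e1 : ks.idxOf m = l1.length := by
          rw [hks, pv_idxOf_append l1 (m :: l2) m hmnl1, List.idxOf_cons_self]
          omega
        have e2 : ks.idxOf m' = l1.length + (m :: l2).idxOf m' := by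
          rw [hks, pv_idxOf_append l1 (m :: l2) m' hm'nl1]
        have e3 : (m :: l2).idxOf m' = (l2.idxOf m').succ :=
          List.idxOf_cons_ne _ (fun e => heq e.symm)
        omega

-- ---- the order dict holds each key's first-occurrence index ----
theorem pv_size_keys (d : PySem.Dict String Int) : d.size = d.keys.length := by
  simp [PySem.Dict.size, PySem.Dict.keys]

theorem pv_order_inv (l : List String) :
    ∀ (d : PySem.Dict String Int), d.keys.Nodup →
    (∀ k ∈ d.keys, d.getD k 0 = (d.keys.idxOf k : Int)) →
    (l.foldl (fun d k => if d.contains k then d else d.insert k (d.size : Int)) d).keys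
        = PySem.Set.update d.keys l ∧
    (l.foldl (fun d k => if d.contains k then d else d.insert k (d.size : Int)) d).keys.Nodup ∧
    (∀ k ∈ (l.foldl (fun d k => if d.contains k then d else d.insert k (d.size : Int)) d).keys,
      (l.foldl (fun d k => if d.contains k then d else d.insert k (d.size : Int)) d).getD k 0
        = ((l.foldl (fun d k => if d.contains k then d else d.insert k (d.size : Int)) d).keys.idxOf k : Int)) := by
  induction l with
  | nil => intro d hnd hgd; exact ⟨rfl, hnd, hgd⟩
  | cons x t ih =>
    intro d hnd hgd
    rw [List.foldl_cons]
    by_cases hc : d.contains x = true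
    · rw [if_pos hc]
      have hupd : PySem.Set.update d.keys (x :: t) = PySem.Set.update (PySem.Set.add d.keys x) t := rfl
      rw [hupd, pv_set_add_mem _ _ ((PySem.Dict.contains_iff_mem_keys d x).mp hc)]
      exact ih d hnd hgd
    · rw [if_neg hc]
      have hc' : d.contains x = false := by simpa using hc
      have hxk : x ∉ d.keys := fun hm => hc ((PySem.Dict.contains_iff_mem_keys d x).mpr hm)
      have hkeys : (d.insert x (d.size : Int)).keys = d.keys ++ [x] :=
        PySem.Dict.keys_insert_of_not_contains d _ hc'
      have hnd' : (d.insert x (d.size : Int)).keys.Nodup := by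
        rw [hkeys]
        exact List.Nodup.append hnd (List.nodup_singleton x)
          (by simpa [List.disjoint_singleton] using hxk)
      have hgd' : ∀ k ∈ (d.insert x (d.size : Int)).keys,
          (d.insert x (d.size : Int)).getD k 0 = ((d.insert x (d.size : Int)).keys.idxOf k : Int) := by
        intro k hk
        rw [hkeys] at hk
        rcases List.mem_append.mp hk with hk | hk
        · have hne : k ≠ x := fun e => hxk (e ▸ hk)
          rw [PySem.Dict.getD_insert_of_ne d _ _ hne, hkeys, List.idxOf_append_of_mem hk]
          exact hgd k hk
        · have hkx : k = x := by simpa using hk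
          subst hkx
          rw [PySem.Dict.getD_insert_self, hkeys, pv_idxOf_append _ _ _ hxk,
            List.idxOf_cons_self, pv_size_keys]
          simp
      have hupd : PySem.Set.update d.keys (x :: t) = PySem.Set.update (PySem.Set.add d.keys x) t := rfl
      have hadd : PySem.Set.add d.keys x = d.keys ++ [x] := by
        simp [PySem.Set.add, PySem.Set.contains, hxk]
      rcases ih (d.insert x (d.size : Int)) hnd' hgd' with ⟨hk1, hk2, hk3⟩
      exact ⟨by rw [hk1, hkeys, hupd, hadd], hk2, hk3⟩

-- a nested fold over per-element lists is the fold over the flattened event list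
theorem pv_foldl_flatMap {α β γ : Type} (data : List α) (f : α → List β) (g : γ → β → γ)
    (init : γ) :
    data.foldl (fun d e => (f e).foldl g d) init = (data.flatMap f).foldl g init := by
  induction data generalizing init with
  | nil => rfl
  | cons e t ih => simp [List.foldl_append, ih]

-- snoc is injective in both components
theorem pv_snoc_inj {α : Type} (a b : List α) (x y : α) (h : a ++ [x] = b ++ [y]) :
    a = b ∧ x = y := by
  have := List.append_inj' h rfl
  refine ⟨this.1, by simpa using this.2⟩

-- e.take (i+1) grows the prefix by e[i]
theorem pv_take_succ (e : List String) (i : Nat) (h : i < e.length) :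
    e.take (i + 1) = e.take i ++ [e.getD i ""] := by
  rw [List.take_succ, List.getD_eq_getElem e "" h]
  simp [List.getElem?_eq_getElem h]

-- B's build loop is the fold of pvStep over the event stream
theorem pv_build_eq (data : List (List String)) :
    pvBuild data = (pvEvents data).foldl pvStep (PySem.Dict.empty, PySem.Dict.empty) := by
  unfold pvBuild pvEvents
  rw [← pv_foldl_flatMap data
    (fun e => (List.range e.length).map (fun i => (e.take i, e.getD i ""))) pvStep]
  apply PySem.List.foldl_congr_mem
  intro st e _
  rw [List.foldl_map]
  apply PySem.List.foldl_congr_mem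
  intro st' i hi
  have hlt : i < e.length := List.mem_range.mp hi
  show _ = pvStep st' (e.take i, e.getD i "")
  simp only [pvStep]
  rw [← pv_take_succ e i hlt]

-- invariant of the build fold: counts, children and key presence
theorem pv_build_inv (L : List (List String × String)) :
    (∀ q, ((L.foldl pvStep (PySem.Dict.empty, PySem.Dict.empty)).1.getD q 0)
        = (((L.map (fun pv => pv.1 ++ [pv.2])).count q : Nat) : Int)) ∧
    (∀ q, ((L.foldl pvStep (PySem.Dict.empty, PySem.Dict.empty)).1.contains q = true)
        ↔ q ∈ L.map (fun pv => pv.1 ++ [pv.2])) ∧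
    (∀ p, (L.foldl pvStep (PySem.Dict.empty, PySem.Dict.empty)).2.getD p []
        = PySem.Set.ofList ((L.filter (fun pv => pv.1 == p)).map Prod.snd)) ∧
    (∀ p, ((L.foldl pvStep (PySem.Dict.empty, PySem.Dict.empty)).2.contains p = true)
        ↔ p ∈ L.map Prod.fst) := by
  induction L using List.reverseRecOn with
  | nil =>
    refine ⟨fun q => ?_, fun q => ?_, fun p => ?_, fun p => ?_⟩ <;>
      simp [PySem.Dict.getD_empty, PySem.Dict.contains_empty]
  | append_singleton L pv ih =>
    obtain ⟨ih1, ih2, ih3, ih4⟩ := ih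
    rw [List.foldl_append]
    simp only [List.foldl_cons, List.foldl_nil]
    by_cases hc : (L.foldl pvStep (PySem.Dict.empty, PySem.Dict.empty)).1.contains
        (pv.1 ++ [pv.2]) = true
    · have hkey : pv.1 ++ [pv.2] ∈ L.map (fun pv' => pv'.1 ++ [pv'.2]) := (ih2 _).mp hc
      have hpvL : pv ∈ L := by
        rcases List.mem_map.mp hkey with ⟨pv', hpv', he⟩
        have h2 := pv_snoc_inj _ _ _ _ he
        have : pv' = pv := Prod.ext_iff.mpr ⟨h2.1, h2.2⟩
        exact this ▸ hpv'
      have hstep : pvStep (L.foldl pvStep (PySem.Dict.empty, PySem.Dict.empty)) pv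
          = ((L.foldl pvStep (PySem.Dict.empty, PySem.Dict.empty)).1.modify
              (pv.1 ++ [pv.2]) 0 (· + 1),
             (L.foldl pvStep (PySem.Dict.empty, PySem.Dict.empty)).2) := by
        simp [pvStep, hc]
      rw [hstep]
      refine ⟨fun q => ?_, fun q => ?_, fun p => ?_, fun p => ?_⟩
      · rw [PySem.Dict.getD_modify]
        simp only [List.map_append, List.map_cons, List.map_nil, List.count_append]
        by_cases hq : q = pv.1 ++ [pv.2]
        · subst hq
          rw [if_pos rfl, ih1 (pv.1 ++ [pv.2])]
          simp only [List.count_cons, List.count_nil, beq_self_eq_true, if_true]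
          push_cast
          ring
        · rw [if_neg hq, ih1 q]
          have h0 : (List.count q [pv.1 ++ [pv.2]]) = 0 := by
            simp only [List.count_cons, List.count_nil]
            simp only [beq_iff_eq]
            rw [if_neg (fun e => hq e.symm)]
          rw [h0]
          simp
      · rw [PySem.Dict.contains_modify]
        simp only [List.map_append, List.map_cons, List.map_nil, List.mem_append,
          List.mem_singleton, Bool.or_eq_true, beq_iff_eq]
        rw [ih2 q]
        constructor
        · rintro (rfl | h)
          · exact Or.inl hkey
          · exact Or.inl h
        · rintro (h | rfl)
          · exact Or.inr h
          · exact Or.inl rfl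
      · rw [ih3 p, List.filter_append, List.map_append]
        by_cases hp : p = pv.1
        · subst hp
          have hf : List.filter (fun pv' => pv'.1 == pv.1) [pv] = [pv] := by simp
          rw [hf]
          simp only [List.map_cons, List.map_nil]
          rw [pv_set_ofList_append, if_pos]
          exact List.mem_map.mpr ⟨pv, List.mem_filter.mpr ⟨hpvL, by simp⟩, rfl⟩
        · have hf : List.filter (fun pv' => pv'.1 == p) [pv] = [] := by
            simp only [List.filter_cons, List.filter_nil, beq_iff_eq]
            rw [if_neg (fun e => hp e.symm)]
          rw [hf]
          simp
      · rw [ih4 p]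
        simp only [List.map_append, List.map_cons, List.map_nil, List.mem_append,
          List.mem_singleton]
        refine ⟨Or.inl, fun h => h.elim id (fun e => ?_)⟩
        exact e ▸ List.mem_map.mpr ⟨pv, hpvL, rfl⟩
    · have hkeynot : pv.1 ++ [pv.2] ∉ L.map (fun pv' => pv'.1 ++ [pv'.2]) :=
        fun hm => hc ((ih2 _).mpr hm)
      have hpvnot : pv ∉ L := fun h => hkeynot (List.mem_map.mpr ⟨pv, h, rfl⟩)
      have hstep : pvStep (L.foldl pvStep (PySem.Dict.empty, PySem.Dict.empty)) pv
          = ((L.foldl pvStep (PySem.Dict.empty, PySem.Dict.empty)).1.insert (pv.1 ++ [pv.2]) 1,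
             (L.foldl pvStep (PySem.Dict.empty, PySem.Dict.empty)).2.insert pv.1
               ((L.foldl pvStep (PySem.Dict.empty, PySem.Dict.empty)).2.getD pv.1 [] ++ [pv.2])) := by
        simp [pvStep, hc]
      rw [hstep]
      refine ⟨fun q => ?_, fun q => ?_, fun p => ?_, fun p => ?_⟩
      · rw [PySem.Dict.getD_insert]
        simp only [List.map_append, List.map_cons, List.map_nil, List.count_append]
        by_cases hq : q = pv.1 ++ [pv.2]
        · subst hq
          rw [if_pos rfl]
          have h0 : (L.map (fun pv' => pv'.1 ++ [pv'.2])).count (pv.1 ++ [pv.2]) = 0 :=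
            List.count_eq_zero.mpr hkeynot
          rw [h0]
          simp
        · rw [if_neg hq, ih1 q]
          have h0 : (List.count q [pv.1 ++ [pv.2]]) = 0 := by
            simp only [List.count_cons, List.count_nil]
            simp only [beq_iff_eq]
            rw [if_neg (fun e => hq e.symm)]
          rw [h0]
          simp
      · rw [PySem.Dict.contains_insert]
        simp only [List.map_append, List.map_cons, List.map_nil, List.mem_append,
          List.mem_singleton, Bool.or_eq_true, beq_iff_eq]
        rw [ih2 q]
        tauto
      · rw [PySem.Dict.getD_insert, List.filter_append, List.map_append]
        by_cases hp : p = pv.1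
        · subst hp
          rw [if_pos rfl]
          have hf : List.filter (fun pv' => pv'.1 == pv.1) [pv] = [pv] := by simp
          rw [hf]
          simp only [List.map_cons, List.map_nil]
          rw [pv_set_ofList_append, if_neg, ih3 pv.1]
          intro hm
          rcases List.mem_map.mp hm with ⟨pv', hpv', he⟩
          rcases List.mem_filter.mp hpv' with ⟨hmem, hp'⟩
          have hp'' : pv'.1 = pv.1 := by simpa using hp'
          have : pv' = pv := Prod.ext_iff.mpr ⟨hp'', he⟩
          exact hpvnot (this ▸ hmem)
        · rw [if_neg hp]
          have hf : List.filter (fun pv' => pv'.1 == p) [pv] = [] := by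
            simp only [List.filter_cons, List.filter_nil, beq_iff_eq]
            rw [if_neg (fun e => hp e.symm)]
          rw [hf, ih3 p]
          simp
      · rw [PySem.Dict.contains_insert]
        simp only [List.map_append, List.map_cons, List.map_nil, List.mem_append,
          List.mem_singleton, Bool.or_eq_true, beq_iff_eq]
        rw [ih4 p]
        tauto

-- a flatMap of conditional singletons is a map of a filter
theorem pv_flatMap_if {α β : Type} (l : List α) (c : α → Bool) (g : α → β) :
    l.flatMap (fun e => if c e then [g e] else []) = (l.filter c).map g := by
  induction l with
  | nil => rfl
  | cons e t ih =>
    by_cases h : c e = true <;> simp [List.flatMap_cons, h, ih, List.filter_cons]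

-- within one sequence, at most the index p.length can produce prefix p
theorem pv_range_filter_take (e p : List String) (n : Nat) (hn : n ≤ e.length) :
    (List.range n).filter (fun i => e.take i == p)
      = if p.length < n ∧ e.take p.length = p then [p.length] else [] := by
  induction n with
  | zero => simp
  | succ n ih =>
    rw [List.range_succ, List.filter_append, ih (le_of_lt (Nat.lt_of_succ_le hn))]
    have hlen : (e.take n).length = n := by
      rw [List.length_take]
      omega
    by_cases hq : e.take n = p
    · have hpl : p.length = n := by rw [← hq, hlen]
      rw [if_neg (by omega), if_pos ⟨by omega, by rw [hpl, hq]⟩]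
      simp [hq, hpl]
    · have hq' : (e.take n == p) = false := by simpa using hq
      simp only [List.filter_singleton, hq', cond_false, List.append_nil]
      by_cases hc : p.length < n ∧ e.take p.length = p
      · rw [if_pos hc, if_pos ⟨by omega, hc.2⟩]
      · rw [if_neg hc, if_neg (by
          rintro ⟨h1, h2⟩
          rcases Nat.lt_succ_iff_lt_or_eq.mp h1 with h1 | h1
          · exact hc ⟨h1, h2⟩
          · exact hq (by rw [← h1, h2]))]

-- the events with first component p are exactly the bag values at p, in data order
theorem pv_events_filter (data : List (List String)) (p : List String) :
    ((pvEvents data).filter (fun pv => pv.1 == p)).map Prod.snd = pvBagVals data p := by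
  unfold pvEvents pvBagVals
  rw [← pv_flatMap_if data (fun e => e.take p.length == p && decide (p.length < e.length))
    (fun e => e.getD p.length "")]
  induction data with
  | nil => rfl
  | cons e t ih =>
    rw [List.flatMap_cons, List.flatMap_cons, List.filter_append, List.map_append, ih]
    congr 1
    rw [List.filter_map]
    have hpred : ((fun pv : List String × String => pv.1 == p) ∘
        (fun i => (e.take i, e.getD i ""))) = (fun i => e.take i == p) := by
      funext i; rfl
    rw [hpred, pv_range_filter_take e p e.length (le_refl _)]
    by_cases hc : p.length < e.length ∧ e.take p.length = p
    · rw [if_pos hc, if_pos (by simp [hc.1, hc.2])]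
      simp [hc.2]
    · rw [if_neg hc, if_neg (by
        rintro h
        simp only [Bool.and_eq_true, beq_iff_eq, decide_eq_true_eq] at h
        exact hc ⟨h.2, h.1⟩)]
      rfl

-- prefix-extension counts in the event stream are bag-value counts
theorem pv_events_count (data : List (List String)) (p : List String) (v : String) :
    ((pvEvents data).map (fun pv => pv.1 ++ [pv.2])).count (p ++ [v])
      = (pvBagVals data p).count v := by
  rw [← pv_events_filter data p]
  simp only [List.count, List.countP_map, List.countP_filter]
  apply List.countP_congr
  intro pv _
  simp only [Function.comp_apply, beq_iff_eq, Bool.and_eq_true, decide_eq_true_eq]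
  constructor
  · intro h
    have := pv_snoc_inj _ _ _ _ h
    exact ⟨this.2, this.1⟩
  · rintro ⟨h2, h1⟩
    rw [h1, h2]

-- a prefix occurs as an event head iff its bag is nonempty
theorem pv_events_mem (data : List (List String)) (p : List String) :
    p ∈ (pvEvents data).map Prod.fst ↔ pvBagVals data p ≠ [] := by
  rw [← pv_events_filter data p]
  constructor
  · intro h
    rcases List.mem_map.mp h with ⟨pv, hpv, rfl⟩
    intro hnil
    rcases List.map_eq_nil_iff.mp hnil with hf
    have : pv ∈ (pvEvents data).filter (fun pv' => pv'.1 == pv.1) :=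
      List.mem_filter.mpr ⟨hpv, by simp⟩
    rw [hf] at this
    cases this
  · intro h
    rcases List.exists_mem_of_ne_nil _ h with ⟨v, hv⟩
    rcases List.mem_map.mp hv with ⟨pv, hpv, rfl⟩
    rcases List.mem_filter.mp hpv with ⟨hmem, hp⟩
    have hp' : pv.1 = p := by simpa using hp
    exact hp' ▸ List.mem_map.mpr ⟨pv, hmem, rfl⟩

-- A's two bag filters advance the prefix characterisation by one step
theorem pv_bag_step (data : List (List String)) (p : List String) (m : String) :
    ((data.filter (fun e => e.take p.length == p && decide (p.length < e.length))).filter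
        (fun x => x.getD p.length "" == m)).filter
      (fun x => decide (p.length + 1 < x.length))
    = data.filter (fun e => e.take (p ++ [m]).length == (p ++ [m])
        && decide ((p ++ [m]).length < e.length)) := by
  rw [List.filter_filter, List.filter_filter]
  apply List.filter_congr
  intro e _
  rw [Bool.eq_iff_iff]
  simp only [Bool.and_eq_true, beq_iff_eq, decide_eq_true_eq, List.length_append,
    List.length_cons, List.length_nil, Nat.zero_add]
  constructor
  · rintro ⟨⟨hl1, hm⟩, ht, hl⟩
    exact ⟨by rw [pv_take_succ e p.length hl, ht, hm], hl1⟩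
  · rintro ⟨ht, hl1⟩
    have hlt : p.length < e.length := by omega
    rw [pv_take_succ e p.length hlt] at ht
    have h2 := pv_snoc_inj _ _ _ _ ht
    exact ⟨⟨hl1, h2.2⟩, h2.1, hlt⟩

-- ---- the loops agree step for step ----
theorem pv_loop_eq (data : List (List String)) (ks : List String)
    (od : PySem.Dict String Int) (cnt : PySem.Dict (List String) Int)
    (ch : PySem.Dict (List String) (List String))
    (hksnd : ks.Nodup)
    (hflat : ∀ e ∈ data, ∀ v ∈ e, v ∈ ks)
    (hord : ∀ v ∈ ks, od.getD v 0 = (ks.idxOf v : Int))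
    (hcnt : ∀ p v, cnt.getD (p ++ [v]) 0 = (((pvBagVals data p).count v : Nat) : Int))
    (hch : ∀ p, ch.getD p [] = PySem.Set.ofList (pvBagVals data p))
    (hchc : ∀ p, (ch.contains p = true) ↔ pvBagVals data p ≠ []) :
    ∀ (fuel : Nat) (p ret : List String),
    pvLoopA ks fuel (data.filter (fun e => e.take p.length == p && decide (p.length < e.length)))
        p.length ret
      = pvLoopB cnt ch od fuel p ret := by
  intro fuel
  induction fuel with
  | zero => intro p ret; rfl
  | succ fuel ih =>
    intro p ret
    by_cases hbag :
        data.filter (fun e => e.take p.length == p && decide (p.length < e.length)) = []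
    · have hvals : pvBagVals data p = [] := by
        unfold pvBagVals
        rw [hbag]
        rfl
      have hcont : ch.contains p = false := by
        rcases Bool.eq_false_or_eq_true (ch.contains p) with h | h
        · exact absurd hvals (by simpa using (hchc p).mp h)
        · exact h
      simp [pvLoopA, pvLoopB, hbag, hcont]
    · have hvne : pvBagVals data p ≠ [] := by
        unfold pvBagVals
        simp [hbag]
      have hcont : ch.contains p = true := (hchc p).mpr hvne
      have hlen : 0 < (data.filter
          (fun e => e.take p.length == p && decide (p.length < e.length))).length :=
        List.length_pos_iff.mpr hbag
      simp only [pvLoopA, pvLoopB, if_pos hlen, hcont, if_true]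
      have hsub : ∀ v ∈ pvBagVals data p, v ∈ ks := by
        intro v hv
        unfold pvBagVals at hv
        rcases List.mem_map.mp hv with ⟨e, he, rfl⟩
        rcases List.mem_filter.mp he with ⟨hed, hp⟩
        simp only [Bool.and_eq_true, decide_eq_true_eq] at hp
        rw [List.getD_eq_getElem e "" hp.2]
        exact hflat e hed _ (List.getElem_mem hp.2)
      have hfreqkeys :
          ((data.filter (fun e => e.take p.length == p && decide (p.length < e.length))).foldl
            (fun d entry => d.modify (entry.getD p.length "") 0 (· + 1))
            (ks.foldl (fun d k => d.insert k (0 : Int)) PySem.Dict.empty)).keys = ks := by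
        rw [PySem.Dict.keys_foldl_modify_key
          (data.filter (fun e => e.take p.length == p && decide (p.length < e.length)))
          (fun e => e.getD p.length "") 0 (fun _ _ => (· + 1))]
        have hz : (ks.foldl (fun d k => d.insert k (0 : Int)) PySem.Dict.empty).keys = ks := by
          rw [PySem.Dict.keys_foldl_insert_key ks (fun k => k) (fun _ _ => (0 : Int))]
          have he : PySem.Set.update (PySem.Dict.empty : PySem.Dict String Int).keys
              (ks.map fun k => k) = PySem.Set.ofList ks := by
            rw [PySem.Dict.keys_empty, List.map_id', PySem.Set.ofList_eq_foldl]
            rfl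
          rw [he]
          exact pv_set_ofList_self ks hksnd
        rw [hz]
        exact pv_set_update_sub _ _ hsub
      have hfreqget : ∀ v,
          ((data.filter (fun e => e.take p.length == p && decide (p.length < e.length))).foldl
            (fun d entry => d.modify (entry.getD p.length "") 0 (· + 1))
            (ks.foldl (fun d k => d.insert k (0 : Int)) PySem.Dict.empty)).getD v 0
          = ((pvBagVals data p).count v : Int) := by
        intro v
        unfold pvBagVals
        rw [← List.foldl_map (f := fun e : List String => e.getD p.length "")
          (g := fun (d : PySem.Dict String Int) x => d.modify x 0 (· + 1)),
          PySem.Dict.getD_foldl_modify_add_one,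
          pv_getD_zeros ks _ (fun w => PySem.Dict.getD_empty w 0)]
        simp
      have hkfun : (fun v => -(cnt.getD (p ++ [v]) 0))
          = (fun v => -(((pvBagVals data p).count v : Int))) :=
        funext fun v => by rw [hcnt p v]
      have hsel :
          PySem.List.max?
            ((data.filter (fun e => e.take p.length == p && decide (p.length < e.length))).foldl
              (fun d entry => d.modify (entry.getD p.length "") 0 (· + 1))
              (ks.foldl (fun d k => d.insert k (0 : Int)) PySem.Dict.empty)).keys
            (fun k => ((data.filter
              (fun e => e.take p.length == p && decide (p.length < e.length))).foldl
              (fun d entry => d.modify (entry.getD p.length "") 0 (· + 1))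
              (ks.foldl (fun d k => d.insert k (0 : Int)) PySem.Dict.empty)).getD k 0)
          = PySem.List.min2? (ch.getD p [])
              (fun v => -(cnt.getD (p ++ [v]) 0)) (fun v => od.getD v 0) := by
        rw [hfreqkeys, funext hfreqget, hch p, hkfun]
        exact pv_pick_eq ks (pvBagVals data p) (fun v => od.getD v 0) hvne hsub hord
      rw [hsel]
      have hbranch : ∀ o : Option String,
          (match o with
           | none => ret
           | some maxS => pvLoopA ks fuel
               (((data.filter (fun e => e.take p.length == p
                   && decide (p.length < e.length))).filter
                 (fun x => x.getD p.length "" == maxS)).filter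
                 (fun x => decide (p.length + 1 < x.length)))
               (p.length + 1) (ret ++ [maxS]))
          = (match o with
           | none => ret
           | some best => pvLoopB cnt ch od fuel (p ++ [best]) (ret ++ [best])) := by
        intro o
        cases o with
        | none => rfl
        | some m =>
          show pvLoopA ks fuel _ (p.length + 1) (ret ++ [m])
              = pvLoopB cnt ch od fuel (p ++ [m]) (ret ++ [m])
          rw [pv_bag_step data p m,
            show p.length + 1 = (p ++ [m]).length by simp]
          exact ih (p ++ [m]) (ret ++ [m])
      exact hbranch _

-- ===== VERDICT (by name: the statement is the Claim_ definition above) =====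
theorem timelines_average_spec : Claim_equal_timelines_average := by
  unfold Claim_equal_timelines_average
  intro data _
  unfold Spec_timelines_average timelines_average timelines_average_alt
  rw [PySem.List.dedup_eq_ofList]
  have hordspec : ∀ v ∈ PySem.Set.ofList (data.flatMap (fun e => e)),
      (data.foldl (fun d entry => entry.foldl
        (fun d k => if d.contains k then d else d.insert k (d.size : Int)) d)
        PySem.Dict.empty).getD v 0
      = ((PySem.Set.ofList (data.flatMap (fun e => e))).idxOf v : Int) := by
    rw [pv_foldl_flatMap data (fun e => e)]
    have hemp : (PySem.Dict.empty : PySem.Dict String Int).keys = [] := PySem.Dict.keys_empty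
    rcases pv_order_inv (data.flatMap (fun e => e)) PySem.Dict.empty
      (by rw [hemp]; exact List.nodup_nil) (by rw [hemp]; intro k hk; cases hk) with ⟨hk1, _, hk3⟩
    have hupd : PySem.Set.update (PySem.Dict.empty : PySem.Dict String Int).keys
        (data.flatMap (fun e => e)) = PySem.Set.ofList (data.flatMap (fun e => e)) := by
      rw [hemp, PySem.Set.ofList_eq_foldl]
      rfl
    rw [hk1, hupd] at hk3
    intro v hv
    exact hk3 v hv
  rcases pv_build_inv (pvEvents data) with ⟨hc1, _, hc3, hc4⟩
  have hbuild := pv_build_eq data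
  have hbag0 : data.filter (fun x => decide (0 < x.length))
      = data.filter (fun e => e.take ([] : List String).length == ([] : List String)
          && decide (([] : List String).length < e.length)) :=
    List.filter_congr (fun a _ => by simp)
  rw [hbag0]
  have := pv_loop_eq data (PySem.Set.ofList (data.flatMap (fun e => e)))
    (data.foldl (fun d entry => entry.foldl
      (fun d k => if d.contains k then d else d.insert k (d.size : Int)) d) PySem.Dict.empty)
    (pvBuild data).1 (pvBuild data).2
    (PySem.Set.nodup_ofList _)
    (fun e he v hv => (PySem.Set.mem_ofList _ _).mpr (List.mem_flatMap.mpr ⟨e, he, hv⟩))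
    hordspec
    (fun p v => by rw [hbuild]; rw [hc1 (p ++ [v]), pv_events_count])
    (fun p => by rw [hbuild]; rw [hc3 p, pv_events_filter])
    (fun p => by rw [hbuild]; rw [hc4 p, pv_events_mem])
    ((data.map List.length).foldl max 0 + 1) [] []
  exact this
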